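-- pv_equiv track=rewrite | github.com/2sjin/Algorithm | 프로그래머스/lv1/12930. 이상한 문자 만들기/이상한 문자 만들기.py | blank_list
-- ===== SOURCE A (Python) =====
-- def blank_list(s):
--     blist = [] if s[0] == " " else [0]
--     cnt = 0
--     for ch in s:
--         if ch == " ":
--             cnt += 1
--         elif cnt >= 1:
--             blist.append(cnt)
--             cnt = 0
--     if cnt >= 1:
--         blist.append(cnt)
--     return blist
-- ===== SOURCE B (Python) =====
-- def blank_list(s):
--     result = [] if s[0] == " " else [0]
--     i, n = 0, len(s)
--     while i < n:
--         if s[i] != " ":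
--             i += 1
--         else:
--             j = i
--             while j < n and s[j] == " ":
--                 j += 1
--             result.append(j - i)
--             i = j
--     return result
-- ===== Notes on version B (the rewrite author's own statement) =====
-- stated objective: alternative
-- what changed: B finds each maximal run of spaces with a two-pointer scan (an inner pointer skips to the end of the run and its length is appended directly), instead of A's single pass maintaining a running counter that is flushed on each non-space and once more after the loop.
import Mathlib
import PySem

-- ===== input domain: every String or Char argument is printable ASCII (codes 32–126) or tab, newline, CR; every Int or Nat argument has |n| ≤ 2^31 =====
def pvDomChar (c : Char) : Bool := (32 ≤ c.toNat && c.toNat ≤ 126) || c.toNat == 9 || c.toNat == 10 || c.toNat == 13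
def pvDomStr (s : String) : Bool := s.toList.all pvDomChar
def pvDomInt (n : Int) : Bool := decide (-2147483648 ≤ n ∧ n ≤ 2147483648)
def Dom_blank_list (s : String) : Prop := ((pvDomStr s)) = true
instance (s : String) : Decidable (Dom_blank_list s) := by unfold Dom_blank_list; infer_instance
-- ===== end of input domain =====

-- B changes nothing in the result; it detects space runs with a two-pointer scan instead of A's counter-and-flush pass (alternative decomposition, same cost).

-- ===== PORT A =====
-- loop body of A: state = (blist, cnt)
def blankStep (st : List Int × Int) (ch : Char) : List Int × Int :=
  if ch = ' ' then (st.1, st.2 + 1)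
  else if st.2 ≥ 1 then (st.1 ++ [st.2], 0)
  else st

def blank_list (s : String) : List Int :=
  match PySem.Str.pyGet? s 0 with
  | none => []   -- unreachable under Pre_blank_list (Python raises IndexError on "")
  | some c0 =>
    let init : List Int := if c0 = ' ' then [] else [0]
    let r := s.toList.foldl blankStep (init, 0)
    if r.2 ≥ 1 then r.1 ++ [r.2] else r.1

-- ===== PORT B =====
-- two-pointer run finder: on a space, measure the whole run and jump past it
def spaceRuns : List Char → List Int
  | [] => []
  | c :: cs =>
    if c = ' ' then
      ((1 + (cs.takeWhile (fun x => x = ' ')).length : Int)) ::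
        spaceRuns (cs.dropWhile (fun x => x = ' '))
    else spaceRuns cs
termination_by l => l.length
decreasing_by
  · exact Nat.lt_succ_of_le (List.length_dropWhile_le _ _)
  · simp

def blank_list_alt (s : String) : List Int :=
  match PySem.Str.pyGet? s 0 with
  | none => []   -- unreachable under Pre_blank_list
  | some c0 =>
    let init : List Int := if c0 = ' ' then [] else [0]
    init ++ spaceRuns s.toList

-- ===== PRECONDITION & SPEC =====
-- Pre_ excludes only the empty string, on which A (and B) raise IndexError at s[0].
def Pre_blank_list (s : String) : Prop := s ≠ ""
instance (s : String) : Decidable (Pre_blank_list s) := by unfold Pre_blank_list; infer_instance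
def pvWitness_blank_list : String := "a  b"

def Spec_blank_list (s : String) (out : List Int) : Prop := out = blank_list_alt s
instance (s : String) (out : List Int) : Decidable (Spec_blank_list s out) := by unfold Spec_blank_list; infer_instance

-- ===== CLAIM (what is proved, stated in full; the proofs are below) =====
def Claim_equal_blank_list : Prop := ∀ (s : String), Dom_blank_list s → Pre_blank_list s → Spec_blank_list s (blank_list s)

-- ===== LEMMAS AND PROOFS =====

-- A's loop-plus-final-flush, as a recursion on the remaining characters
def flushRuns (cnt : Int) : List Char → List Int
  | [] => if cnt ≥ 1 then [cnt] else []
  | c :: cs =>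
    if c = ' ' then flushRuns (cnt + 1) cs
    else if cnt ≥ 1 then cnt :: flushRuns 0 cs
    else flushRuns cnt cs

theorem foldl_blankStep (cs : List Char) : ∀ (bl : List Int) (cnt : Int),
    (let r := cs.foldl blankStep (bl, cnt);
     if r.2 ≥ 1 then r.1 ++ [r.2] else r.1) = bl ++ flushRuns cnt cs := by
  induction cs with
  | nil =>
    intro bl cnt
    simp only [List.foldl_nil, flushRuns]
    split <;> simp
  | cons c cs ih =>
    intro bl cnt
    simp only [List.foldl_cons, flushRuns, blankStep]
    by_cases hc : c = ' '
    · simp [hc, ih]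
    · by_cases h1 : cnt ≥ 1
      · simp [hc, h1, ih]
      · simp [hc, h1, ih]

theorem flushRuns_eq (cs : List Char) :
    (flushRuns 0 cs = spaceRuns cs) ∧
    (∀ cnt : Int, 1 ≤ cnt →
      flushRuns cnt cs =
        (cnt + ((cs.takeWhile (fun x => x = ' ')).length : Int)) ::
          spaceRuns (cs.dropWhile (fun x => x = ' '))) := by
  induction cs with
  | nil =>
    refine ⟨by simp [flushRuns, spaceRuns], ?_⟩
    intro cnt h1
    have : cnt ≥ 1 := h1
    simp [flushRuns, spaceRuns, this]
  | cons c cs ih =>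
    by_cases hc : c = ' '
    · constructor
      · rw [show flushRuns 0 (c :: cs) = flushRuns 1 cs by simp [flushRuns, hc]]
        rw [ih.2 1 (by norm_num)]
        conv_rhs => rw [spaceRuns.eq_def]
        simp [hc]
      · intro cnt h1
        rw [show flushRuns cnt (c :: cs) = flushRuns (cnt + 1) cs by simp [flushRuns, hc]]
        rw [ih.2 (cnt + 1) (by omega)]
        simp [List.takeWhile, List.dropWhile, hc]
        omega
    · constructor
      · rw [show flushRuns 0 (c :: cs) = flushRuns 0 cs by simp [flushRuns, hc]]
        rw [ih.1]
        conv_rhs => rw [spaceRuns.eq_def]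
        simp [hc]
      · intro cnt h1
        rw [show flushRuns cnt (c :: cs) = cnt :: flushRuns 0 cs by
              simp [flushRuns, hc]; omega]
        rw [ih.1]
        conv_rhs => rw [spaceRuns.eq_def]
        simp [List.takeWhile, List.dropWhile, hc]

-- ===== VERDICT (by name: the statement is the Claim_ definition above) =====
theorem blank_list_spec : Claim_equal_blank_list := by
  intro s _ _
  unfold Spec_blank_list blank_list blank_list_alt
  cases h : PySem.Str.pyGet? s 0 with
  | none => rfl
  | some c0 =>
    simp only
    rw [show ∀ l : List Char, (let r := l.foldl blankStep ((if c0 = ' ' then ([]:List Int) else [0]), 0);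
          if r.2 ≥ 1 then r.1 ++ [r.2] else r.1) = (if c0 = ' ' then ([]:List Int) else [0]) ++ flushRuns 0 l
        from fun l => foldl_blankStep l _ 0]
    rw [(flushRuns_eq s.toList).1]
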